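-- pv_equiv track=rewrite | github.com/the-atlas-protocol/rexfinhub | etp_tracker/reconciler.py | _extract_accession
-- ===== SOURCE A (Python) =====
-- def _extract_accession(filename: str) -> str:
--     """Pull the 18-char accession number from an index filename.
--
--     Examples:
--         edgar/data/822977/0001193125-26-101234-index.htm  -> 0001193125-26-101234
--         edgar/data/822977/0001193125-26-101234.txt        -> 0001193125-26-101234
--     """
--     if not filename:
--         return ""
--     base = filename.rsplit("/", 1)[-1]
--     # Strip common suffixes
--     for suffix in ("-index.htm", "-index.html", ".txt"):
--         if base.endswith(suffix):
--             base = base[: -len(suffix)]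
--             break
--     return base.strip()
-- ===== SOURCE B (Python) =====
-- def _extract_accession(filename: str) -> str:
--     base = filename.rsplit("/", 1)[-1]
--     root, dot, ext = base.rpartition(".")
--     if dot and ext == "txt":
--         base = root
--     elif dot and ext in ("htm", "html") and root.endswith("-index"):
--         base = root[: -len("-index")]
--     return base.strip()
-- ===== Notes on version B (the rewrite author's own statement) =====
-- stated objective: alternative
-- what changed: Instead of iterating over a tuple of candidate suffixes with endswith and break, B splits the basename once at its last dot with rpartition and decides from the extension ('txt', or 'htm'/'html' with a '-index' stem) what to remove.
import Mathlib
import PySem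

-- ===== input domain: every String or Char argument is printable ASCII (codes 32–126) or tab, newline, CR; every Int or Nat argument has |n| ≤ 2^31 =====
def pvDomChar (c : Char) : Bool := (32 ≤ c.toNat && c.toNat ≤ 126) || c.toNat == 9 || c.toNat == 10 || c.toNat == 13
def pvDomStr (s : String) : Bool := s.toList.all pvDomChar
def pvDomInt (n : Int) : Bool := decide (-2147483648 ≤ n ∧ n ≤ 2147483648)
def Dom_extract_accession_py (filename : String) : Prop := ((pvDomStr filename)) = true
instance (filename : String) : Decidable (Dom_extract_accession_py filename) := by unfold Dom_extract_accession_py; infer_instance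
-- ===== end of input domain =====

-- B replaces A's iterate-suffixes-with-break loop by one rpartition at the last dot and a
-- decision on the extension (objective: alternative decomposition, same cost).

-- ===== PORT A =====
-- hand port of s.rsplit("/", 1)[-1] (single-char separator): the segment after the last '/'; exact
def pyRsplitSlashLast (cs : List Char) : List Char :=
  (cs.reverse.takeWhile (fun c => c ≠ '/')).reverse

def extract_accession_py (filename : String) : String :=
  if filename.toList = [] then "" else
  let base := pyRsplitSlashLast filename.toList
  -- for suffix in ("-index.htm", "-index.html", ".txt"): if base.endswith(suffix): base = base[:-len(suffix)]; break
  let base :=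
    if PySem.Chars.endswith base ("-index.htm".toList) then PySem.List.slice base none (some (-10))
    else if PySem.Chars.endswith base ("-index.html".toList) then PySem.List.slice base none (some (-11))
    else if PySem.Chars.endswith base (".txt".toList) then PySem.List.slice base none (some (-4))
    else base
  String.ofList (PySem.Chars.strip base)

-- ===== PORT B =====
-- hand port of base.rpartition(".") (single-char separator): split at the LAST '.'; exact
def pyRpartitionDot (cs : List Char) : List Char × List Char × List Char :=
  if cs.reverse.dropWhile (fun c => c ≠ '.') = [] then ([], [], cs)
  else ((cs.reverse.dropWhile (fun c => c ≠ '.')).tail.reverse, ['.'],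
        (cs.reverse.takeWhile (fun c => c ≠ '.')).reverse)

def extract_accession_py_alt (filename : String) : String :=
  let base := pyRsplitSlashLast filename.toList
  let p := pyRpartitionDot base
  let root := p.1
  let dot := p.2.1
  let ext := p.2.2
  let base :=
    if dot ≠ [] ∧ ext = "txt".toList then root
    else if dot ≠ [] ∧ (ext = "htm".toList ∨ ext = "html".toList) ∧
            PySem.Chars.endswith root ("-index".toList) then
      PySem.List.slice root none (some (-6))
    else base
  String.ofList (PySem.Chars.strip base)

-- ===== PRECONDITION & SPEC =====
def Spec_extract_accession_py (filename : String) (out : String) : Prop := out = extract_accession_py_alt filename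
instance (filename : String) (out : String) : Decidable (Spec_extract_accession_py filename out) := by unfold Spec_extract_accession_py; infer_instance

-- ===== CLAIM (what is proved, stated in full; the proofs are below) =====
def Claim_equal_extract_accession_py : Prop := ∀ (filename : String), Dom_extract_accession_py filename → Spec_extract_accession_py filename (extract_accession_py filename)

-- ===== LEMMAS AND PROOFS =====

-- splitting a prefix at the first '.' on both sides
lemma prefix_dot (q s' e t : List Char) (hq : '.' ∉ q) (he : '.' ∉ e) :
    q ++ '.' :: s' <+: e ++ '.' :: t ↔ q = e ∧ s' <+: t := by
  induction q generalizing e with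
  | nil =>
    cases e with
    | nil => simp
    | cons c e' =>
      simp only [List.nil_append, List.cons_append, List.cons_prefix_cons]
      constructor
      · rintro ⟨h, -⟩; exact absurd (h ▸ List.mem_cons_self) he
      · rintro ⟨h, -⟩; exact absurd h (by simp)
  | cons a q' ih =>
    cases e with
    | nil =>
      simp only [List.cons_append, List.nil_append, List.cons_prefix_cons]
      constructor
      · rintro ⟨h, -⟩; exact absurd (h ▸ List.mem_cons_self) hq
      · rintro ⟨h, -⟩; exact absurd h (by simp)
    | cons b e' =>
      have hq' : '.' ∉ q' := fun h => hq (List.mem_cons_of_mem _ h)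
      have he' : '.' ∉ e' := fun h => he (List.mem_cons_of_mem _ h)
      simp only [List.cons_append, List.cons_prefix_cons, ih e' hq' he', List.cons.injEq]
      tauto

-- endswith as a reverse-prefix
lemma endswith_rev (base sfx : List Char) :
    PySem.Chars.endswith base sfx = true ↔ sfx.reverse <+: base.reverse := by
  rw [PySem.Chars.endswith_iff]
  exact (List.reverse_prefix).symm


-- the two suffix-stripping decisions agree on every basename
lemma core_eq (base : List Char) :
    (if PySem.Chars.endswith base ("-index.htm".toList) then PySem.List.slice base none (some (-10))
     else if PySem.Chars.endswith base ("-index.html".toList) then PySem.List.slice base none (some (-11))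
     else if PySem.Chars.endswith base (".txt".toList) then PySem.List.slice base none (some (-4))
     else base)
    =
    (if (pyRpartitionDot base).2.1 ≠ [] ∧ (pyRpartitionDot base).2.2 = "txt".toList then
       (pyRpartitionDot base).1
     else if (pyRpartitionDot base).2.1 ≠ [] ∧
             ((pyRpartitionDot base).2.2 = "htm".toList ∨ (pyRpartitionDot base).2.2 = "html".toList) ∧
             PySem.Chars.endswith (pyRpartitionDot base).1 ("-index".toList) then
       PySem.List.slice (pyRpartitionDot base).1 none (some (-6))
     else base) := by
  rcases hrest : base.reverse.dropWhile (fun c => c ≠ '.') with _ | ⟨c, t⟩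
  · -- no dot in the basename: neither side changes it
    have hnodot : ∀ x ∈ base.reverse, x ≠ '.' := by
      rw [List.dropWhile_eq_nil_iff] at hrest
      intro x hx; simpa using hrest x hx
    have hno : ∀ sfx : List Char, '.' ∈ sfx.reverse → PySem.Chars.endswith base sfx = false := by
      intro sfx hdot
      by_contra h
      have h' : PySem.Chars.endswith base sfx = true := by
        cases hb : PySem.Chars.endswith base sfx <;> simp_all
      have hpre := (endswith_rev base sfx).mp h'
      exact hnodot '.' (hpre.subset hdot) rfl
    have hpart : pyRpartitionDot base = ([], [], base) := by
      unfold pyRpartitionDot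
      rw [hrest]
      simp
    rw [hno _ (by decide), hno _ (by decide), hno _ (by decide), hpart]
    simp
  · -- basename ends in '.' :: ext (reversed view)
    have hc : c = '.' := by
      have hne : base.reverse.dropWhile (fun c => decide (c ≠ '.')) ≠ [] := by rw [hrest]; simp
      have hp := List.head_dropWhile_not (fun c => decide (c ≠ '.')) hne
      have h3 : (base.reverse.dropWhile (fun c => decide (c ≠ '.'))).head? = some c := by
        rw [hrest]; rfl
      rw [List.head?_eq_some_head hne] at h3
      rw [Option.some.injEq] at h3
      rw [h3] at hp
      simpa using hp
    subst hc
    generalize hextdef : base.reverse.takeWhile (fun c => decide (c ≠ '.')) = ext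
    have hsplit : base.reverse = ext ++ '.' :: t := by
      conv_lhs => rw [← List.takeWhile_append_dropWhile (p := fun c => decide (c ≠ '.')) (l := base.reverse)]
      rw [hrest, hextdef]
    have hext : '.' ∉ ext := by
      intro h
      have := List.mem_takeWhile_imp (hextdef ▸ h)
      simp at this
    have hbase : base = t.reverse ++ '.' :: ext.reverse := by
      have := congrArg List.reverse hsplit
      simpa using this
    have hpart : pyRpartitionDot base = (t.reverse, ['.'], ext.reverse) := by
      unfold pyRpartitionDot
      rw [hrest, hextdef]
      simp
    have e1 : ("-index.htm".toList).reverse = ['m','t','h'] ++ '.' :: "xedni-".toList := by decide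
    have e2 : ("-index.html".toList).reverse = ['l','m','t','h'] ++ '.' :: "xedni-".toList := by decide
    have e3 : (".txt".toList).reverse = ['t','x','t'] ++ '.' :: ([] : List Char) := by decide
    have hhtm : PySem.Chars.endswith base ("-index.htm".toList) = true ↔
        ext = ['m','t','h'] ∧ "xedni-".toList <+: t := by
      rw [endswith_rev, e1, hsplit, prefix_dot _ _ _ _ (by decide) hext]
      tauto
    have hhtml : PySem.Chars.endswith base ("-index.html".toList) = true ↔
        ext = ['l','m','t','h'] ∧ "xedni-".toList <+: t := by
      rw [endswith_rev, e2, hsplit, prefix_dot _ _ _ _ (by decide) hext]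
      tauto
    have htxt : PySem.Chars.endswith base (".txt".toList) = true ↔ ext = ['t','x','t'] := by
      rw [endswith_rev, e3]
      have : ['t','x','t'] ++ ['.'] = ['t','x','t'] ++ '.' :: ([] : List Char) := rfl
      rw [this, hsplit, prefix_dot _ _ _ _ (by decide) hext]
      simp [eq_comm]
    have hidx : PySem.Chars.endswith t.reverse ("-index".toList) = true ↔ "xedni-".toList <+: t := by
      rw [endswith_rev]
      have e4 : ("-index".toList).reverse = "xedni-".toList := by decide
      rw [e4, List.reverse_reverse]
    rw [hpart]
    dsimp only
    by_cases hx1 : ext = ['m','t','h']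
    · subst hx1
      by_cases hp : "xedni-".toList <+: t
      · rw [if_pos (hhtm.mpr ⟨rfl, hp⟩)]
        have b1 : ¬ (['.'] ≠ ([] : List Char) ∧ ['m','t','h'].reverse = "txt".toList) :=
          fun h => absurd h.2 (by decide)
        rw [if_neg b1, if_pos ⟨by simp, Or.inl (by decide), hidx.mpr hp⟩]
        have hlen : ("xedni-".toList).length ≤ t.length := hp.length_le
        rw [PySem.List.slice_to_neg_ofNat base 10 (by norm_num),
            PySem.List.slice_to_neg_ofNat t.reverse 6 (by norm_num)]
        rw [hbase]
        have hl1 : (t.reverse ++ '.' :: ['m','t','h'].reverse).length = t.length + 4 := by simp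
        rw [hl1]
        have harith : t.length + 4 - 10 = t.length - 6 := by omega
        rw [harith, List.take_append_of_le_length (by simp), List.length_reverse]
      · have a1 : ¬ PySem.Chars.endswith base ("-index.htm".toList) = true :=
          fun h => hp (hhtm.mp h).2
        have a2 : ¬ PySem.Chars.endswith base ("-index.html".toList) = true :=
          fun h => by simpa using (hhtml.mp h).1
        have a3 : ¬ PySem.Chars.endswith base (".txt".toList) = true :=
          fun h => by simpa using htxt.mp h
        have b1 : ¬ (['.'] ≠ ([] : List Char) ∧ ['m','t','h'].reverse = "txt".toList) :=
          fun h => absurd h.2 (by decide)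
        have b2 : ¬ (['.'] ≠ ([] : List Char) ∧
            (['m','t','h'].reverse = "htm".toList ∨ ['m','t','h'].reverse = "html".toList) ∧
            PySem.Chars.endswith t.reverse ("-index".toList) = true) :=
          fun h => hp (hidx.mp h.2.2)
        rw [if_neg a1, if_neg a2, if_neg a3, if_neg b1, if_neg b2]
    · by_cases hx2 : ext = ['l','m','t','h']
      · subst hx2
        by_cases hp : "xedni-".toList <+: t
        · rw [if_neg (by rw [hhtm]; simp), if_pos (hhtml.mpr ⟨rfl, hp⟩)]
          have b1 : ¬ (['.'] ≠ ([] : List Char) ∧ ['l','m','t','h'].reverse = "txt".toList) :=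
            fun h => absurd h.2 (by decide)
          rw [if_neg b1, if_pos ⟨by simp, Or.inr (by decide), hidx.mpr hp⟩]
          have hlen : ("xedni-".toList).length ≤ t.length := hp.length_le
          rw [PySem.List.slice_to_neg_ofNat base 11 (by norm_num),
              PySem.List.slice_to_neg_ofNat t.reverse 6 (by norm_num)]
          rw [hbase]
          have hl1 : (t.reverse ++ '.' :: ['l','m','t','h'].reverse).length = t.length + 5 := by simp
          rw [hl1]
          have harith : t.length + 5 - 11 = t.length - 6 := by omega
          rw [harith, List.take_append_of_le_length (by simp), List.length_reverse]
        · have a1 : ¬ PySem.Chars.endswith base ("-index.htm".toList) = true :=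
            fun h => by simpa using (hhtm.mp h).1
          have a2 : ¬ PySem.Chars.endswith base ("-index.html".toList) = true :=
            fun h => hp (hhtml.mp h).2
          have a3 : ¬ PySem.Chars.endswith base (".txt".toList) = true :=
            fun h => by simpa using htxt.mp h
          have b1 : ¬ (['.'] ≠ ([] : List Char) ∧ ['l','m','t','h'].reverse = "txt".toList) :=
            fun h => absurd h.2 (by decide)
          have b2 : ¬ (['.'] ≠ ([] : List Char) ∧
              (['l','m','t','h'].reverse = "htm".toList ∨ ['l','m','t','h'].reverse = "html".toList) ∧
              PySem.Chars.endswith t.reverse ("-index".toList) = true) :=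
            fun h => hp (hidx.mp h.2.2)
          rw [if_neg a1, if_neg a2, if_neg a3, if_neg b1, if_neg b2]
      · by_cases hx3 : ext = ['t','x','t']
        · subst hx3
          have a1 : ¬ PySem.Chars.endswith base ("-index.htm".toList) = true :=
            fun h => by simpa using (hhtm.mp h).1
          have a2 : ¬ PySem.Chars.endswith base ("-index.html".toList) = true :=
            fun h => by simpa using (hhtml.mp h).1
          have b1 : (['.'] ≠ ([] : List Char) ∧ ['t','x','t'].reverse = "txt".toList) :=
            ⟨by simp, by decide⟩
          rw [if_neg a1, if_neg a2, if_pos (htxt.mpr rfl), if_pos b1]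
          rw [PySem.List.slice_to_neg_ofNat base 4 (by norm_num), hbase]
          have hl1 : (t.reverse ++ '.' :: ['t','x','t'].reverse).length = t.length + 4 := by simp
          rw [hl1]
          have harith : t.length + 4 - 4 = t.reverse.length := by simp
          rw [harith, List.take_left]
        · have hr1 : ext.reverse = "txt".toList ↔ ext = ['t','x','t'] := by
            rw [List.reverse_eq_iff]; constructor <;> (intro h; rw [h]) <;> decide
          have hr2 : ext.reverse = "htm".toList ↔ ext = ['m','t','h'] := by
            rw [List.reverse_eq_iff]; constructor <;> (intro h; rw [h]) <;> decide
          have hr3 : ext.reverse = "html".toList ↔ ext = ['l','m','t','h'] := by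
            rw [List.reverse_eq_iff]; constructor <;> (intro h; rw [h]) <;> decide
          have a1 : ¬ PySem.Chars.endswith base ("-index.htm".toList) = true :=
            fun h => hx1 (hhtm.mp h).1
          have a2 : ¬ PySem.Chars.endswith base ("-index.html".toList) = true :=
            fun h => hx2 (hhtml.mp h).1
          have a3 : ¬ PySem.Chars.endswith base (".txt".toList) = true :=
            fun h => hx3 (htxt.mp h)
          have b1 : ¬ (['.'] ≠ ([] : List Char) ∧ ext.reverse = "txt".toList) :=
            fun h => hx3 (hr1.mp h.2)
          have b2 : ¬ (['.'] ≠ ([] : List Char) ∧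
              (ext.reverse = "htm".toList ∨ ext.reverse = "html".toList) ∧
              PySem.Chars.endswith t.reverse ("-index".toList) = true) :=
            fun h => h.2.1.elim (fun h' => hx1 (hr2.mp h')) (fun h' => hx2 (hr3.mp h'))
          rw [if_neg a1, if_neg a2, if_neg a3, if_neg b1, if_neg b2]

-- ===== VERDICT (by name: the statement is the Claim_ definition above) =====
theorem extract_accession_py_spec : Claim_equal_extract_accession_py := by
  intro filename _
  unfold Spec_extract_accession_py extract_accession_py extract_accession_py_alt
  by_cases h0 : filename.toList = []
  · simp only [h0]
    decide
  · simp only [h0, if_false]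
    exact congrArg (fun l => String.ofList (PySem.Chars.strip l)) (core_eq (pyRsplitSlashLast filename.toList))
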